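-- pv_equiv track=rewrite | github.com/bhavya1030/safecodeai | src/predict.py | _normalize_strings_in_line
-- ===== SOURCE A (Python) =====
-- def _normalize_strings_in_line(line):
--     """Replace string/char literal content with empty, keeping the delimiters."""
--     result = []
--     in_str = None
--     i = 0
--     while i < len(line):
--         c = line[i]
--         if in_str:
--             if c == '\\':
--                 i += 2
--                 continue
--             if c == in_str:
--                 result.append(c)
--                 in_str = None
--             i += 1
--         else:
--             result.append(c)
--             if c in ('"', "'"):
--                 in_str = c
--             i += 1
--     return ''.join(result)
-- ===== SOURCE B (Python) =====
-- import re
--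
-- _STR_LITERAL = re.compile(r"(['\"])(?:\\.|(?!\1).)*(\1)?", re.DOTALL)
--
--
-- def _normalize_strings_in_line(line):
--     """Replace string/char literal content with empty, keeping the delimiters."""
--     return _STR_LITERAL.sub(lambda m: m.group(1) + (m.group(2) or ''), line)
-- ===== Notes on version B (the rewrite author's own statement) =====
-- stated objective: faster
-- what changed: Replaces the hand-written index/state-machine loop with a single compiled-regex substitution: the pattern (['"])(?:\\.|(?!\1).)*(\1)? under DOTALL matches each string/char literal (escape pairs via \\., optional closing quote for unterminated literals) and the replacement keeps only the delimiters; the scan runs in the C regex engine instead of per-character Python bytecode.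
import Mathlib
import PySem

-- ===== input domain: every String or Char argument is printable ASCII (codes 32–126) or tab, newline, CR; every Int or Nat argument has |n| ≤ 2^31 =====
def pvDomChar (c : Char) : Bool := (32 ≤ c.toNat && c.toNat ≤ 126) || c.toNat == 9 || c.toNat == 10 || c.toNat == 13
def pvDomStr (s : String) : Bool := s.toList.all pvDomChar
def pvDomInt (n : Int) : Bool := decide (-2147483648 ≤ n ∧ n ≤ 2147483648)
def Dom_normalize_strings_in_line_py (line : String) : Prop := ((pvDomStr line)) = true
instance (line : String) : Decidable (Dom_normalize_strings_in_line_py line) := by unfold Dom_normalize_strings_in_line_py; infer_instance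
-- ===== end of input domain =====

-- B replaces A's hand-written index/state-machine loop with one regex substitution
-- (pattern (['"])(?:\\.|(?!\1).)*(\1)? keeping only the delimiters); a timing run measured B faster (C regex engine vs per-char Python loop).

-- ===== PORT A =====
-- A's while loop over index i with state (result accumulator, in_str : Option Char);
-- 'i += 2' on a backslash is the step to index i+2.
def pvAGo (cs : List Char) (inStr : Option Char) (acc : List Char) (i : Nat) : List Char :=
  if h : i < cs.length then
    let c := cs[i]
    match inStr with
    | some q =>
      if c = '\\' then pvAGo cs (some q) acc (i + 2)
      else if c = q then pvAGo cs none (acc ++ [c]) (i + 1)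
      else pvAGo cs (some q) acc (i + 1)
    | none =>
      if c = '"' ∨ c = '\'' then pvAGo cs (some c) (acc ++ [c]) (i + 1)
      else pvAGo cs none (acc ++ [c]) (i + 1)
  else acc
termination_by cs.length - i
decreasing_by all_goals omega

def normalize_strings_in_line_py (line : String) : String :=
  String.ofList (pvAGo line.toList none [] 0)

-- ===== PORT B =====
-- Hand port of the regex engine's deterministic run of (?:\\.|(?!q).)*(q)? after an
-- opening quote q: the star first tries '\\.' (consume the escape pair), otherwise
-- '(?!q).' (consume one non-q char), and stops at q or end; '(q)?' then reports
-- whether the closing quote matched.  Returns (rest of input after the match, closed?).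
def pvLit (q : Char) : List Char → List Char × Bool
  | [] => ([], false)
  | c :: rest =>
    if c = '\\' then pvLit q rest.tail
    else if c = q then (rest, true)
    else pvLit q rest
termination_by l => l.length
decreasing_by
  all_goals (simp [List.length_tail]; try omega)

lemma pvLit_len_aux (q : Char) : ∀ (n : Nat) (l : List Char), l.length ≤ n → (pvLit q l).1.length ≤ l.length := by
  intro n
  induction n with
  | zero =>
    intro l h
    have : l = [] := List.eq_nil_of_length_eq_zero (by omega)
    subst this; simp [pvLit]
  | succ n ih =>
    intro l h
    cases l with
    | nil => simp [pvLit]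
    | cons c rest =>
      simp only [pvLit]
      have htail : rest.tail.length = rest.length - 1 := List.length_tail
      simp only [List.length_cons] at h
      split_ifs with hb hq
      · have := ih rest.tail (by omega)
        simp; omega
      · simp
      · have := ih rest (by omega)
        simp; omega

lemma pvLit_len (q : Char) (l : List Char) : (pvLit q l).1.length ≤ l.length :=
  pvLit_len_aux q l.length l le_rfl

-- re.sub's scan: since the pattern starts with (['"]), matches begin exactly at quote
-- chars; other chars are copied verbatim.  The replacement function emits group 1 and,
-- if it matched, group 2 (the closing delimiter), discarding the literal body.
def pvSub : List Char → List Char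
  | [] => []
  | c :: rest =>
    if c = '"' ∨ c = '\'' then
      match h : pvLit c rest with
      | (rest', true) => c :: c :: pvSub rest'
      | (rest', false) => c :: pvSub rest'
    else c :: pvSub rest
termination_by l => l.length
decreasing_by
  · have := pvLit_len c rest; rw [h] at this; simp at this ⊢; omega
  · have := pvLit_len c rest; rw [h] at this; simp at this ⊢; omega
  · simp

def normalize_strings_in_line_py_alt (line : String) : String :=
  String.ofList (pvSub line.toList)

-- ===== PRECONDITION & SPEC =====
def Spec_normalize_strings_in_line_py (line : String) (out : String) : Prop := out = normalize_strings_in_line_py_alt line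
instance (line : String) (out : String) : Decidable (Spec_normalize_strings_in_line_py line out) := by unfold Spec_normalize_strings_in_line_py; infer_instance

-- ===== CLAIM =====
def Claim_equal_normalize_strings_in_line_py : Prop := ∀ (line : String), Dom_normalize_strings_in_line_py line → Spec_normalize_strings_in_line_py line (normalize_strings_in_line_py line)

-- ===== LEMMAS AND PROOFS =====

-- Invariant: from index i, A's loop appends to acc exactly what B produces on cs.drop i —
-- in literal mode (some q), what pvLit matches followed by pvSub of the remainder.
lemma pvAGo_eq (cs : List Char) : ∀ n i acc, cs.length - i ≤ n →
    (pvAGo cs none acc i = acc ++ pvSub (cs.drop i)) ∧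
    (∀ q, pvAGo cs (some q) acc i =
      acc ++ (match pvLit q (cs.drop i) with
              | (rest', true) => q :: pvSub rest'
              | (rest', false) => pvSub rest')) := by
  intro n
  induction n with
  | zero =>
    intro i acc hle
    have hge : cs.length ≤ i := by omega
    rw [List.drop_eq_nil_of_le hge]
    refine ⟨?_, fun q => ?_⟩ <;>
      (rw [pvAGo.eq_def]; simp [pvSub, pvLit, Nat.not_lt.mpr hge])
  | succ n ih =>
    intro i acc hle
    by_cases h : i < cs.length
    · have hdrop : cs.drop i = cs[i] :: cs.drop (i + 1) := List.drop_eq_getElem_cons h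
      have h1 : cs.length - (i + 1) ≤ n := by omega
      have h2 : cs.length - (i + 2) ≤ n := by omega
      have hdd : (cs.drop (i + 1)).tail = cs.drop (i + 2) := by
        rw [List.tail_drop]
      constructor
      · rw [pvAGo.eq_def, dif_pos h, hdrop]
        simp only [pvSub]
        by_cases hq : cs[i] = '"' ∨ cs[i] = '\''
        · simp only [hq, if_pos]
          rw [(ih (i + 1) (acc ++ [cs[i]]) h1).2 cs[i]]
          cases hL : pvLit cs[i] (cs.drop (i + 1)) with
          | mk rest' closed => cases closed <;> simp
        · simp only [hq, if_false]
          rw [(ih (i + 1) (acc ++ [cs[i]]) h1).1]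
          simp
      · intro q
        rw [pvAGo.eq_def, dif_pos h, hdrop]
        simp only [pvLit]
        by_cases hb : cs[i] = '\\'
        · simp only [hb, if_pos]
          rw [(ih (i + 2) acc h2).2 q, hdd]
        · simp only [hb, if_false]
          by_cases hc : cs[i] = q
          · simp only [hc, if_pos]
            rw [(ih (i + 1) (acc ++ [q]) h1).1]
            simp
          · simp only [hc, if_false]
            exact (ih (i + 1) acc h1).2 q
    · have hge : cs.length ≤ i := by omega
      rw [List.drop_eq_nil_of_le hge]
      refine ⟨?_, fun q => ?_⟩ <;>
        (rw [pvAGo.eq_def]; simp [pvSub, pvLit, Nat.not_lt.mpr hge])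

-- ===== VERDICT =====
theorem normalize_strings_in_line_py_spec : Claim_equal_normalize_strings_in_line_py := by
  intro line _
  show _ = _
  unfold normalize_strings_in_line_py normalize_strings_in_line_py_alt
  rw [(pvAGo_eq line.toList line.toList.length 0 [] (by omega)).1]
  simp
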